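-- pv_equiv track=rewrite | github.com/ingridjackeline/tst-lp1 | tst/miniteste/miniteste18/labir_consulta_direita.py | consulta_direita
-- ===== SOURCE A (Python) =====
-- def consulta_direita(labirinto):
-- 	casas_livres = 0
-- 	jogador = False
--
-- 	for i in range(len(labirinto)):
-- 		for j in range(len(labirinto[i])):
-- 			if labirinto[i][j] == "*":
-- 				jogador = True
-- 			elif jogador == True:
-- 				if labirinto[i][j] == " ":
-- 					casas_livres += 1
-- 				elif labirinto[i][j] == "P":
-- 					return casas_livres
-- 		if jogador == True and j == len(labirinto[i]) - 1:
-- 			return casas_livres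
-- ===== SOURCE B (Python) =====
-- def consulta_direita(labirinto):
-- 	starred = next((row for row in labirinto if "*" in row), None)
-- 	if starred is None:
-- 		return None
-- 	cells = list(starred)
-- 	after = cells[cells.index("*") + 1:]
-- 	stop = after.index("P") if "P" in after else len(after)
-- 	return after[:stop].count(" ")
-- ===== Notes on version B (the rewrite author's own statement) =====
-- stated objective: simpler
-- what changed: B replaces A's flag-driven nested per-cell loop by staged whole-list operations: next() finds the starred row, a slice takes the cells after the first '*', index('P') truncates before the first 'P', and .count(' ') counts the free cells -- no hand-written counting loop at all.
-- outside the precondition, e.g. on consulta_direita([[' ', 'P']]): A returns None, B returns None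
import Mathlib
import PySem

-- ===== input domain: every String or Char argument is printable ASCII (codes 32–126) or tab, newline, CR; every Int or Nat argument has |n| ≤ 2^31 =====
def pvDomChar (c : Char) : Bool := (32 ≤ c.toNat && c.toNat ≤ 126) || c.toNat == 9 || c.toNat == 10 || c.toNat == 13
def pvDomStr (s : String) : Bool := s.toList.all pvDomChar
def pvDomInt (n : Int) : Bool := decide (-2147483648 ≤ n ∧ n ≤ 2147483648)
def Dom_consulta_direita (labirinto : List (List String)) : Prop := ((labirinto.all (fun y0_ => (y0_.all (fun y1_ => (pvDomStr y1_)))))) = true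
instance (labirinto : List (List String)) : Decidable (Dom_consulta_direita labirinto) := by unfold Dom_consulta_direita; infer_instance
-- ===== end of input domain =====

-- B replaces A's flag-driven nested loop by staged whole-list operations: find the
-- starred row, slice after the first '*', truncate before the first 'P' (index),
-- and count ' ' with .count — no per-cell counting loop (objective: simpler).

-- ===== PORT A =====
-- inner loop over one row: returns (early-return value, jogador, casas_livres)
def pvInnerA : List String → Bool → Int → Option Int × Bool × Int
  | [], jog, cas => (none, jog, cas)
  | c :: rest, jog, cas =>
    if c = "*" then pvInnerA rest true cas
    else if jog = true then
      if c = " " then pvInnerA rest jog (cas + 1)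
      else if c = "P" then (some cas, jog, cas)
      else pvInnerA rest jog cas
    else pvInnerA rest jog cas

-- outer loop; jprev models Python's variable j surviving across rows (none = unbound)
def pvOuterA : List (List String) → Bool → Int → Option Int → Int
  | [], _, _, _ => 0   -- Python falls through returning None here (excluded by Pre_)
  | row :: rest, jog, cas, jprev =>
    match pvInnerA row jog cas with
    | (some r, _, _) => r
    | (none, jog', cas') =>
      let j' : Option Int := if row.isEmpty then jprev else some ((row.length : Int) - 1)
      if jog' = true ∧ j' = some ((row.length : Int) - 1) then cas'
      else pvOuterA rest jog' cas' j'

def consulta_direita (labirinto : List (List String)) : Int :=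
  pvOuterA labirinto false 0 none

-- ===== PORT B =====
def consulta_direita_alt (labirinto : List (List String)) : Int :=
  match labirinto.find? (fun row => decide ("*" ∈ row)) with
  | none => 0   -- Python falls through returning None here (excluded by Pre_)
  | some starred =>
    let after := PySem.List.slice starred (some ((((PySem.List.index? starred "*").getD 0 : Nat) : Int) + 1)) none
    let stop : Int := if "P" ∈ after then (((PySem.List.index? after "P").getD 0 : Nat) : Int) else ((after.length : Nat) : Int)
    ((PySem.List.count (PySem.List.slice after none (some stop)) " " : Nat) : Int)

-- ===== PRECONDITION & SPEC =====
-- Pre_ excludes mazes in which no row contains "*": there Python A (and B) fall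
-- through and return None, which is not an Int.
def Pre_consulta_direita (labirinto : List (List String)) : Prop :=
  ∃ row ∈ labirinto, "*" ∈ row
instance (labirinto : List (List String)) : Decidable (Pre_consulta_direita labirinto) := by
  unfold Pre_consulta_direita; infer_instance

def pvWitness_consulta_direita : List (List String) := [["#", " "], ["*", " ", "x", " ", "P", " "]]

def Spec_consulta_direita (labirinto : List (List String)) (out : Int) : Prop := out = consulta_direita_alt labirinto
instance (labirinto : List (List String)) (out : Int) : Decidable (Spec_consulta_direita labirinto out) := by unfold Spec_consulta_direita; infer_instance

-- ===== CLAIM (what is proved, stated in full; the proofs are below) =====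
def Claim_equal_consulta_direita : Prop := ∀ (labirinto : List (List String)), Dom_consulta_direita labirinto → Pre_consulta_direita labirinto → Spec_consulta_direita labirinto (consulta_direita labirinto)

-- ===== LEMMAS AND PROOFS =====

-- a row without "*" leaves the state untouched
theorem pvInnerA_no_star (row : List String) (h : "*" ∉ row) (cas : Int) :
    pvInnerA row false cas = (none, false, cas) := by
  induction row with
  | nil => rfl
  | cons c rest ih =>
    have hc : c ≠ "*" := fun hc => h (by simp [hc])
    simp [pvInnerA, hc]
    exact ih (fun hm => h (List.mem_cons_of_mem _ hm))

-- cells before the first "*" are skipped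
theorem pvInnerA_skip (pre : List String) (h : "*" ∉ pre) (l : List String) (cas : Int) :
    pvInnerA (pre ++ l) false cas = pvInnerA l false cas := by
  induction pre with
  | nil => rfl
  | cons c rest ih =>
    have hc : c ≠ "*" := fun hc => h (by simp [hc])
    simp [pvInnerA, hc]
    exact ih (fun hm => h (List.mem_cons_of_mem _ hm))

-- the value A extracts from the suffix after the first "*", as a closed scan
def pvScan : List String → Int → Int
  | [], cas => cas
  | cell :: rest, cas =>
    if cell = "P" then cas
    else pvScan rest (if cell = " " then cas + 1 else cas)

-- with jogador set, the inner loop computes pvScan (early return or fall-through)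
theorem pvInnerA_true (suf : List String) (cas : Int) :
    (∃ c', pvInnerA suf true cas = (some (pvScan suf cas), true, c')) ∨
    pvInnerA suf true cas = (none, true, pvScan suf cas) := by
  induction suf generalizing cas with
  | nil => right; rfl
  | cons c rest ih =>
    by_cases hstar : c = "*"
    · have hP : c ≠ "P" := by simp [hstar]
      have hS : c ≠ " " := by simp [hstar]
      simpa [pvInnerA, pvScan, hstar, hP, hS] using ih cas
    · by_cases hS : c = " "
      · have hP : c ≠ "P" := by simp [hS]
        simpa [pvInnerA, pvScan, hstar, hS, hP] using ih (cas + 1)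
      · by_cases hP : c = "P"
        · exact Or.inl ⟨cas, by simp [pvInnerA, pvScan, hP]⟩
        · simpa [pvInnerA, pvScan, hstar, hS, hP] using ih cas

-- B's staged value (truncate before the first "P", count " ") equals A's scan
theorem pvScan_eq_count (after : List String) (cas : Int) :
    pvScan after cas =
      cas + (((after.take (if "P" ∈ after then (PySem.List.index? after "P").getD 0 else after.length)).count " " : Nat) : Int) := by
  induction after generalizing cas with
  | nil => simp [pvScan]
  | cons cell rest ih =>
    by_cases hP : cell = "P"
    · simp [pvScan, hP]
    · have hmem : ("P" ∈ cell :: rest) ↔ ("P" ∈ rest) := by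
        simp [List.mem_cons, Ne.symm hP]
      rw [PySem.List.index?_cons_of_ne rest hP]
      by_cases hPr : "P" ∈ rest
      · obtain ⟨k, hk⟩ := Option.isSome_iff_exists.mp
          ((PySem.List.index?_isSome_iff rest "P").mpr hPr)
        simp only [pvScan, if_neg hP, hmem, if_pos hPr, hk, Option.map_some, Option.getD_some,
          List.take_succ_cons, List.count_cons, ih]
        by_cases hS : cell = " "
        · simp only [hS, if_true]
          simp
          ring
        · simp [hS]
      · have hk : PySem.List.index? rest "P" = none :=
          (PySem.List.index?_eq_none_iff rest "P").mpr hPr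
        simp only [pvScan, if_neg hP, hmem, if_neg hPr, hk, Option.map_none, Option.getD_none,
          List.length_cons, List.take_succ_cons, List.count_cons, ih, List.take_length]
        by_cases hS : cell = " "
        · simp only [hS, if_true]
          simp
          ring
        · simp [hS]

-- B's value on the first starred row equals pvScan of the suffix after the first "*"
theorem pvAlt_starred (row : List String) (rest : List (List String)) (k : Nat)
    (hidx : PySem.List.index? row "*" = some k) (suf : List String)
    (hdrop : PySem.List.slice row (some ((k : Int) + 1)) none = suf) (hs : "*" ∈ row) :
    consulta_direita_alt (row :: rest) = pvScan suf 0 := by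
  have hstop : (if "P" ∈ suf then (((PySem.List.index? suf "P").getD 0 : Nat) : Int)
      else ((suf.length : Nat) : Int)) =
      (((if "P" ∈ suf then (PySem.List.index? suf "P").getD 0 else suf.length : Nat)) : Int) := by
    by_cases h : "P" ∈ suf <;> simp [h]
  have hfind : List.find? (fun row => decide ("*" ∈ row)) (row :: rest) = some row := by
    simp [hs]
  simp only [consulta_direita_alt, hfind, hidx, Option.getD_some, hdrop, hstop, PySem.List.slice_to_natCast,
    PySem.List.count_eq]
  rw [pvScan_eq_count suf 0]
  simp

-- the generalized main induction: any surviving j value, jogador still false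
theorem pvOuterA_eq (lab : List (List String)) (hpre : ∃ row ∈ lab, "*" ∈ row)
    (jprev : Option Int) : pvOuterA lab false 0 jprev = consulta_direita_alt lab := by
  induction lab generalizing jprev with
  | nil => exact absurd hpre (by simp)
  | cons row rest ih =>
    by_cases hs : "*" ∈ row
    · -- decompose the row at its first "*"
      obtain ⟨k, hidx⟩ := Option.isSome_iff_exists.mp
        ((PySem.List.index?_isSome_iff row "*").mpr hs)
      obtain ⟨pre, suf, hrow, hlen, hnot⟩ :=
        (PySem.List.index?_eq_some_iff row "*" k).mp hidx
      have hne : ¬ row.isEmpty := by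
        subst hrow; simp
      have hdrop : PySem.List.slice row (some ((k : Int) + 1)) none = suf := by
        have : ((k : Int) + 1) = ((k + 1 : ℕ) : Int) := by
          push_cast; ring
        rw [this, PySem.List.slice_from_natCast]
        subst hrow
        rw [← hlen]
        simp
      have hA : pvInnerA row false 0 = pvInnerA suf true 0 := by
        subst hrow
        rw [pvInnerA_skip pre hnot]
        simp [pvInnerA]
      have hBalt := pvAlt_starred row rest k hidx suf hdrop hs
      rcases pvInnerA_true suf 0 with ⟨c', hcase⟩ | hcase
      · -- early return inside the starred row
        simp only [pvOuterA, hA, hcase, hBalt]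
      · -- fall-through: end-of-row check fires
        simp only [pvOuterA, hA, hcase, hBalt]
        simp [hne]
    · -- no "*" in this row: state unchanged, recurse
      have hrest : ∃ r ∈ rest, "*" ∈ r := by
        rcases hpre with ⟨r, hr, hrs⟩
        rcases List.mem_cons.mp hr with h | h
        · exact absurd (h ▸ hrs) hs
        · exact ⟨r, h, hrs⟩
      have hB : consulta_direita_alt (row :: rest) = consulta_direita_alt rest := by
        simp [consulta_direita_alt, hs]
      simp only [pvOuterA, pvInnerA_no_star row hs 0, hB]
      simp only [Bool.false_eq_true, false_and, if_false]
      exact ih hrest _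

-- ===== VERDICT (by name: the statement is the Claim_ definition above) =====
theorem consulta_direita_spec : Claim_equal_consulta_direita := by
  intro lab _ hpre
  unfold Spec_consulta_direita consulta_direita
  exact pvOuterA_eq lab hpre none
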